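-- pv_equiv track=rewrite | github.com/daniel-reich/ubiquitous-fiesta | X5dZShpH7hfoRn7bJ_3.py | c_fuge
-- ===== SOURCE A (Python) =====
-- import itertools
--
-- def c_fuge(n, k):
--   if n <= 1 or k <= 1 or k > n:
--     return False
--   elif n == k:
--     return True
--   else:
--     factors = get_prime_factors(n)
--     possible_sums = set(sum(k) for i in range(1,len(factors)+1) for k in itertools.permutations(factors,i))
--     if k in factors or n-k in factors or k in possible_sums:
--       return True
--   return False
--
-- def get_prime_factors(n):
--   factors = []
--   for i in range(2,n):
--     while not n%i:
--       factors.append(i)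
--       n //= i
--   return factors
-- ===== SOURCE B (Python) =====
-- def c_fuge(n, k):
--     if n <= 1 or k <= 1 or k > n:
--         return False
--     if n == k:
--         return True
--     # factor n by trial division up to sqrt(n)
--     factors = []
--     m = n
--     p = 2
--     while p * p <= m:
--         while m % p == 0:
--             factors.append(p)
--             m //= p
--         p += 1
--     if m > 1:
--         factors.append(m)
--     # subset-sum DP over the multiset of prime factors
--     sums = {0}
--     for q in factors:
--         sums |= {s + q for s in sums}
--     return k in sums or (n - k) in factors
-- ===== Notes on version B (the rewrite author's own statement) =====
-- stated objective: alternative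
-- what changed: Factorization by trial division only up to sqrt(n) (instead of all i < n) and a subset-sum set DP over the prime factors (instead of summing all O(m!) permutations of every length); intended as faster, but a timing run could not confirm a ratio (A timed out at n=4096 where B returned, and at the sizes both finish A is already sub-millisecond).
import Mathlib
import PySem

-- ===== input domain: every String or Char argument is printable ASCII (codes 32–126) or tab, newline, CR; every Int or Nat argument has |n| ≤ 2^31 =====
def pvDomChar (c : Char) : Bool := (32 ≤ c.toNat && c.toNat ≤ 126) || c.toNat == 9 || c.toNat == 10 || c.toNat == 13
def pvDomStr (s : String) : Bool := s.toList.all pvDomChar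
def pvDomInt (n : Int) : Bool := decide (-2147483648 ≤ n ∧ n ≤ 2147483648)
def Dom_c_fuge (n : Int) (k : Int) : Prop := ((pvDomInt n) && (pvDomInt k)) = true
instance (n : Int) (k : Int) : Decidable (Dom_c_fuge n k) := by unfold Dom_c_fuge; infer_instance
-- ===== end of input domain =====

-- B replaces A's trial division up to n by trial division up to √n, and A's sums over all
-- O(m·m!) permutations of the factor list by a subset-sum set DP; same return value everywhere.

-- ===== PORT A =====
-- inner 'while not n % i: factors.append(i); n //= i' of get_prime_factors, fuel-bounded
-- (fuel = current n's natAbs is always enough on the inputs reached: each division at least halves n)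
def pvWhileDivA (i : Int) : Nat → Int → List Int → List Int × Int
  | 0, m, acc => (acc, m)
  | fuel+1, m, acc =>
    if PySem.Int.mod m i = 0 then pvWhileDivA i fuel (PySem.Int.floordiv m i) (acc ++ [i])
    else (acc, m)

-- one iteration of 'for i in range(2, n)': the state is (factors, current n)
def pvGpfStep (st : List Int × Int) (i : Int) : List Int × Int :=
  pvWhileDivA i st.2.natAbs st.2 st.1

def get_prime_factors_pair (n : Int) : List Int × Int :=
  (PySem.List.pyRange 2 n 1).foldl pvGpfStep ([], n)

def get_prime_factors (n : Int) : List Int := (get_prime_factors_pair n).1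

-- itertools.permutations(xs, r): pick an index, recurse on the list with that index removed
def pvPerms : Nat → List Int → List (List Int)
  | 0, _ => [[]]
  | r+1, xs =>
    (List.range xs.length).flatMap
      (fun j => (pvPerms r (xs.eraseIdx j)).map (fun p => xs.getD j 0 :: p))

-- 'sum(k) for i in range(1, len(factors)+1) for k in itertools.permutations(factors, i)'
def pvPermSumsList (factors : List Int) : List Int :=
  (PySem.List.pyRange 1 ((factors.length : Int) + 1) 1).flatMap
    (fun i => (pvPerms i.natAbs factors).map (fun l => l.sum))

def c_fuge (n : Int) (k : Int) : Bool :=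
  if n ≤ 1 ∨ k ≤ 1 ∨ k > n then false
  else if n = k then true
  else
    if k ∈ get_prime_factors n ∨ n - k ∈ get_prime_factors n ∨
       k ∈ PySem.Set.ofList (pvPermSumsList (get_prime_factors n)) then true
    else false

-- ===== PORT B =====
-- inner 'while m % p == 0: factors.append(p); m //= p', fuel-bounded as in A's port
def pvStripB (p : Int) : Nat → Int → List Int → List Int × Int
  | 0, m, acc => (acc, m)
  | fuel+1, m, acc =>
    if PySem.Int.mod m p = 0 then pvStripB p fuel (PySem.Int.floordiv m p) (acc ++ [p])
    else (acc, m)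

-- outer 'while p * p <= m: …; p += 1' (fuel n.natAbs + 2 is enough: p grows, m never grows)
def pvFacLoopB : Nat → Int → Int → List Int → List Int × Int
  | 0, _, m, acc => (acc, m)
  | fuel+1, p, m, acc =>
    if p * p ≤ m then
      pvFacLoopB fuel (p+1) (pvStripB p m.natAbs m acc).2 (pvStripB p m.natAbs m acc).1
    else (acc, m)

def pvFactorB (n : Int) : List Int :=
  if (pvFacLoopB (n.natAbs + 2) 2 n []).2 > 1 then
    (pvFacLoopB (n.natAbs + 2) 2 n []).1 ++ [(pvFacLoopB (n.natAbs + 2) 2 n []).2]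
  else (pvFacLoopB (n.natAbs + 2) 2 n []).1

-- 'sums = {0}; for q in factors: sums |= {s + q for s in sums}'
def pvSubsetSums (factors : List Int) : PySem.Set Int :=
  factors.foldl
    (fun s q => PySem.Set.union s (PySem.Set.ofList (s.map (fun y => y + q))))
    (PySem.Set.ofList [0])

def c_fuge_alt (n : Int) (k : Int) : Bool :=
  if n ≤ 1 ∨ k ≤ 1 ∨ k > n then false
  else if n = k then true
  else
    decide (k ∈ pvSubsetSums (pvFactorB n) ∨ n - k ∈ pvFactorB n)

-- ===== PRECONDITION & SPEC =====
def Spec_c_fuge (n : Int) (k : Int) (out : Bool) : Prop := out = c_fuge_alt n k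
instance (n : Int) (k : Int) (out : Bool) : Decidable (Spec_c_fuge n k out) := by unfold Spec_c_fuge; infer_instance

-- ===== CLAIM (what is proved, stated in full; the proofs are below) =====
def Claim_equal_c_fuge : Prop := ∀ (n : Int) (k : Int), Dom_c_fuge n k → Spec_c_fuge n k (c_fuge n k)

-- ===== LEMMAS AND PROOFS =====

-- the canonical factorization both factor loops compute
def pvPF (n : Int) : List Int := (Nat.primeFactorsList n.toNat).map (fun p : ℕ => (p : Int))

theorem pvPrimeOfNoSmall (a : Int) (ha : 2 ≤ a)
    (h : ∀ d : Int, 2 ≤ d → d < a → ¬ d ∣ a) : (a.toNat).Prime := by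
  rw [Nat.prime_def_lt]
  refine ⟨by omega, ?_⟩
  intro m hm hdvd
  by_contra hm1
  have hm0 : m ≠ 0 := by
    rintro rfl
    have := Nat.eq_zero_of_zero_dvd hdvd
    omega
  have hm2 : 2 ≤ m := by omega
  have hdZ : (m : Int) ∣ a := by
    have h1 : ((m : ℕ) : Int) ∣ ((a.toNat : ℕ) : Int) := Int.natCast_dvd_natCast.mpr hdvd
    rwa [Int.toNat_of_nonneg (by omega : (0:Int) ≤ a)] at h1
  exact h (m : Int) (by omega) (by omega) hdZ

-- ---- inner while characterization ----
theorem pvWhileDivA_spec (i : Int) (hi : 2 ≤ i) :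
    ∀ (fuel : Nat) (m : Int) (acc : List Int), 0 < m → m.natAbs ≤ fuel →
    ∃ e : Nat, ∃ m' : Int,
      pvWhileDivA i fuel m acc = (acc ++ List.replicate e i, m') ∧
      m = i ^ e * m' ∧ ¬ (i ∣ m') ∧ 0 < m' := by
  intro fuel
  induction fuel with
  | zero =>
    intro m acc hm hf
    exact absurd hf (by omega)
  | succ f ih =>
    intro m acc hm hf
    by_cases hdvd : i ∣ m
    · have hmod : PySem.Int.mod m i = 0 := (PySem.Int.mod_eq_zero_iff_dvd m i).mpr hdvd
      obtain ⟨c, hc⟩ := hdvd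
      have hi0 : (0:Int) < i := by omega
      have hfd : PySem.Int.floordiv m i = c := by
        rw [PySem.Int.floordiv_eq_ediv_of_pos hi0, hc, Int.mul_ediv_cancel_left _ (by omega)]
      have hc0 : 0 < c := by nlinarith
      have hcabs : c.natAbs < m.natAbs := by
        have h1 : m.natAbs = i.natAbs * c.natAbs := by rw [hc, Int.natAbs_mul]
        have h2 : 2 * c.natAbs ≤ i.natAbs * c.natAbs :=
          Nat.mul_le_mul_right c.natAbs (by omega)
        omega
      obtain ⟨e, m', heq, hfac, hnd, hm'⟩ := ih c (acc ++ [i]) hc0 (by omega)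
      refine ⟨e+1, m', ?_, ?_, hnd, hm'⟩
      · show pvWhileDivA i (f+1) m acc = _
        simp only [pvWhileDivA, hmod, if_pos, hfd, heq]
        rw [List.append_assoc]
        simp [List.replicate_succ]
      · rw [hc, hfac]; ring
    · have hmod : ¬ PySem.Int.mod m i = 0 := fun h => hdvd ((PySem.Int.mod_eq_zero_iff_dvd m i).mp h)
      refine ⟨0, m, ?_, by simp, hdvd, hm⟩
      show pvWhileDivA i (f+1) m acc = _
      simp [pvWhileDivA, hmod]

theorem pvStripB_eq_whileDiv (p : Int) :
    ∀ (fuel : Nat) (m : Int) (acc : List Int), pvStripB p fuel m acc = pvWhileDivA p fuel m acc := by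
  intro fuel
  induction fuel with
  | zero => intro m acc; rfl
  | succ f ih =>
    intro m acc
    show pvStripB p (f+1) m acc = pvWhileDivA p (f+1) m acc
    simp only [pvStripB, pvWhileDivA]
    split
    · exact ih _ _
    · rfl

theorem pvStripB_spec (p : Int) (hp : 2 ≤ p) (fuel : Nat) (m : Int) (acc : List Int)
    (hm : 0 < m) (hf : m.natAbs ≤ fuel) :
    ∃ e : Nat, ∃ m' : Int,
      pvStripB p fuel m acc = (acc ++ List.replicate e p, m') ∧
      m = p ^ e * m' ∧ ¬ (p ∣ m') ∧ 0 < m' := by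
  rw [pvStripB_eq_whileDiv]
  exact pvWhileDivA_spec p hp fuel m acc hm hf

-- a nondecreasing list of primes whose product is n IS n's prime factor list
theorem sorted_primes_eq_pvPF (n : Int) (hn : 0 < n) (l : List Int)
    (hs : l.Pairwise (· ≤ ·)) (hp : ∀ x ∈ l, (x.toNat).Prime ∧ 0 ≤ x)
    (hprod : l.prod = n) : l = pvPF n := by
  have hback : (l.map Int.toNat).map (fun p : ℕ => (p : Int)) = l := by
    rw [List.map_map]
    conv_rhs => rw [← List.map_id l]
    exact List.map_congr_left fun x hx => Int.toNat_of_nonneg (hp x hx).2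
  have hLprod : (l.map Int.toNat).prod = n.toNat := by
    have h1 : (((l.map Int.toNat).prod : ℕ) : Int) = l.prod := by
      rw [Nat.cast_list_prod, hback]
    have h2 := h1.trans hprod
    omega
  have hLprime : ∀ p ∈ l.map Int.toNat, p.Prime := by
    intro p hp'
    obtain ⟨x, hx, rfl⟩ := List.mem_map.mp hp'
    exact (hp x hx).1
  have hperm : List.Perm (l.map Int.toNat) ((n.toNat).primeFactorsList) :=
    Nat.primeFactorsList_unique hLprod hLprime
  have hsortL : (l.map Int.toNat).Pairwise (· ≤ ·) :=
    List.Pairwise.map _ (fun _ _ h => Int.toNat_le_toNat h) hs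
  have hsortPF : ((n.toNat).primeFactorsList).Pairwise (· ≤ ·) :=
    (Nat.primeFactorsList_sorted n.toNat).pairwise
  have hLeq : l.map Int.toNat = (n.toNat).primeFactorsList :=
    List.Perm.eq_of_pairwise' hsortL hsortPF hperm
  rw [← hback, hLeq]
  rfl

-- ---- A's outer loop ----
theorem pvALoop_inv (n : Int) :
    ∀ (cnt : Nat) (a m : Int) (acc : List Int),
      (n - a).toNat = cnt → 2 ≤ a → a ≤ n → 0 < m →
      (∀ d : Int, 2 ≤ d → d < a → ¬ d ∣ m) →
      (∀ x ∈ acc, 2 ≤ x ∧ x < a ∧ (x.toNat).Prime) →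
      acc.Pairwise (· ≤ ·) →
      acc.prod * m = n →
      ∃ acc' m',
        (PySem.List.pyRange a n 1).foldl pvGpfStep (acc, m) = (acc', m') ∧
        0 < m' ∧
        (∀ d : Int, 2 ≤ d → d < n → ¬ d ∣ m') ∧
        (∀ x ∈ acc', 2 ≤ x ∧ x < n ∧ (x.toNat).Prime) ∧
        acc'.Pairwise (· ≤ ·) ∧
        acc'.prod * m' = n := by
  intro cnt
  induction cnt with
  | zero =>
    intro a m acc hcnt ha2 han hm hno hacc hsort hprod
    obtain rfl : a = n := by omega
    rw [PySem.List.pyRange_one_eq_nil (le_refl a)]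
    exact ⟨acc, m, rfl, hm, hno, hacc, hsort, hprod⟩
  | succ c ih =>
    intro a m acc hcnt ha2 han hm hno hacc hsort hprod
    have hlt : a < n := by omega
    rw [PySem.List.pyRange_one_cons hlt, List.foldl_cons]
    obtain ⟨e, m₁, heq, hfac, hnd, hm₁⟩ :=
      pvWhileDivA_spec a ha2 m.natAbs m acc hm (le_refl _)
    have hstep : pvGpfStep (acc, m) a = (acc ++ List.replicate e a, m₁) := by
      unfold pvGpfStep; exact heq
    rw [hstep]
    refine ih (a+1) m₁ (acc ++ List.replicate e a) (by omega) (by omega) (by omega) hm₁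
      ?_ ?_ ?_ ?_
    · intro d hd2 hdlt hddvd
      rcases lt_or_ge d a with hda | hda
      · exact hno d hd2 hda (hfac ▸ hddvd.mul_left _)
      · obtain rfl : d = a := by omega
        exact hnd hddvd
    · intro x hx
      rcases List.mem_append.mp hx with hx | hx
      · obtain ⟨h1, h2, h3⟩ := hacc x hx
        exact ⟨h1, by omega, h3⟩
      · have hxa := List.eq_of_mem_replicate hx
        subst hxa
        have he0 : e ≠ 0 := by
          rintro rfl
          simp at hx
        have hadvd : x ∣ m := by
          rw [hfac]
          exact Dvd.dvd.mul_right (dvd_pow_self x he0) m₁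
        refine ⟨ha2, by omega, pvPrimeOfNoSmall x ha2 ?_⟩
        intro d hd2 hdlt hda
        exact hno d hd2 hdlt (hda.trans hadvd)
    · rw [List.pairwise_append]
      refine ⟨hsort, List.pairwise_replicate.mpr (Or.inr le_rfl), ?_⟩
      intro x hx y hy
      have h1 := (hacc x hx).2.1
      have h2 := List.eq_of_mem_replicate hy
      omega
    · rw [List.prod_append, List.prod_replicate, mul_assoc, ← hfac]
      exact hprod

theorem get_prime_factors_eq (n : Int) (hn : 2 ≤ n) :
    get_prime_factors n = if (n.toNat).Prime then [] else pvPF n := by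
  obtain ⟨acc', m', heq, hm', hno, hacc, hsort, hprod⟩ :=
    pvALoop_inv n (n - 2).toNat 2 n [] rfl (by omega) hn (by omega)
      (by intro d h1 h2; omega)
      (by intro x hx; simp at hx) List.Pairwise.nil (by simp)
  have hgpf : get_prime_factors n = acc' := by
    unfold get_prime_factors get_prime_factors_pair
    rw [heq]
  have hm'dvd : m' ∣ n := ⟨acc'.prod, by rw [← hprod]; ring⟩
  have hm'le : m' ≤ n := Int.le_of_dvd (by omega) hm'dvd
  have hm'cases : m' = 1 ∨ m' = n := by
    by_contra hcon
    push Not at hcon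
    exact hno m' (by omega) (by omega) dvd_rfl
  by_cases hP : (n.toNat).Prime
  · rw [if_pos hP, hgpf]
    have hm'n : m' = n := by
      rcases hm'cases with h1 | h2
      · exfalso
        subst h1
        rw [mul_one] at hprod
        have hne : acc' ≠ [] := by
          rintro rfl
          simp at hprod
          omega
        obtain ⟨x, hx⟩ := List.exists_mem_of_ne_nil acc' hne
        obtain ⟨hx2, hxn, _⟩ := hacc x hx
        have hxdvd : x ∣ n := hprod ▸ List.dvd_prod hx
        have hxd' : x.toNat ∣ n.toNat := by
          rw [← Int.natCast_dvd_natCast]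
          rwa [Int.toNat_of_nonneg (by omega : (0:Int) ≤ x),
               Int.toNat_of_nonneg (by omega : (0:Int) ≤ n)]
        rcases hP.eq_one_or_self_of_dvd x.toNat hxd' with h | h <;> omega
      · exact h2
    subst hm'n
    have hprod1 : acc'.prod = 1 := by
      have hne : m' ≠ 0 := by omega
      have h1 : acc'.prod * m' = 1 * m' := by rw [hprod, one_mul]
      exact mul_right_cancel₀ hne h1
    cases acc' with
    | nil => rfl
    | cons x rest =>
      exfalso
      have hx2 := (hacc x (List.mem_cons_self)).1
      have hxdvd : x ∣ (1:Int) := hprod1 ▸ List.dvd_prod (List.mem_cons_self)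
      have := Int.le_of_dvd one_pos hxdvd
      omega
  · rw [if_neg hP, hgpf]
    have hm'1 : m' = 1 := by
      rcases hm'cases with h1 | h2
      · exact h1
      · exfalso
        subst h2
        exact hP (pvPrimeOfNoSmall m' hn (fun d h1 h2 => hno d h1 h2))
    subst hm'1
    rw [mul_one] at hprod
    exact sorted_primes_eq_pvPF n (by omega) acc' hsort
      (fun x hx => ⟨(hacc x hx).2.2, by have := (hacc x hx).1; omega⟩) hprod

-- ---- B's outer loop ----
theorem pvBLoop_inv (n : Int) :
    ∀ (fuel : Nat) (p m : Int) (acc : List Int),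
      2 ≤ p → 0 < m →
      (∀ d : Int, 2 ≤ d → d < p → ¬ d ∣ m) →
      (∀ x ∈ acc, 2 ≤ x ∧ x < p ∧ (x.toNat).Prime) →
      acc.Pairwise (· ≤ ·) →
      acc.prod * m = n →
      (m + 2 - p).toNat ≤ fuel →
      ∃ acc' m',
        pvFacLoopB fuel p m acc = (acc', m') ∧ 0 < m' ∧
        (∀ x ∈ acc', 2 ≤ x ∧ (x.toNat).Prime) ∧
        acc'.Pairwise (· ≤ ·) ∧
        acc'.prod * m' = n ∧
        (m' = 1 ∨ ((m'.toNat).Prime ∧ ∀ x ∈ acc', x < m')) := by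
  intro fuel
  induction fuel with
  | zero =>
    intro p m acc hp hm hno hacc hsort hprod hfuel
    have hmp : m < p := by omega
    refine ⟨acc, m, rfl, hm, fun x hx => ⟨(hacc x hx).1, (hacc x hx).2.2⟩, hsort, hprod, ?_⟩
    left
    by_contra h1
    exact hno m (by omega) hmp dvd_rfl
  | succ f ih =>
    intro p m acc hp hm hno hacc hsort hprod hfuel
    by_cases hcond : p * p ≤ m
    · obtain ⟨e, m₁, heq, hfac, hnd, hm₁⟩ := pvStripB_spec p hp m.natAbs m acc hm (le_refl _)
      have hred : pvFacLoopB (f+1) p m acc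
          = pvFacLoopB f (p+1) m₁ (acc ++ List.replicate e p) := by
        show (if p * p ≤ m then
          pvFacLoopB f (p+1) (pvStripB p m.natAbs m acc).2 (pvStripB p m.natAbs m acc).1
          else (acc, m)) = _
        rw [if_pos hcond, heq]
      rw [hred]
      have hpm : p ≤ m := by nlinarith
      have hpow : (1:Int) ≤ p ^ e := one_le_pow₀ (by omega)
      have hm₁m : m₁ ≤ m := by nlinarith
      refine ih (p+1) m₁ (acc ++ List.replicate e p) (by omega) hm₁ ?_ ?_ ?_ ?_ (by omega)
      · intro d hd2 hdlt hddvd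
        rcases lt_or_ge d p with hdp | hdp
        · exact hno d hd2 hdp (hfac ▸ hddvd.mul_left _)
        · obtain rfl : d = p := by omega
          exact hnd hddvd
      · intro x hx
        rcases List.mem_append.mp hx with hx | hx
        · obtain ⟨h1, h2, h3⟩ := hacc x hx
          exact ⟨h1, by omega, h3⟩
        · have hxa := List.eq_of_mem_replicate hx
          subst hxa
          have he0 : e ≠ 0 := by
            rintro rfl
            simp at hx
          have hadvd : x ∣ m := by
            rw [hfac]
            exact Dvd.dvd.mul_right (dvd_pow_self x he0) m₁
          refine ⟨hp, by omega, pvPrimeOfNoSmall x hp ?_⟩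
          intro d hd2 hdlt hda
          exact hno d hd2 hdlt (hda.trans hadvd)
      · rw [List.pairwise_append]
        refine ⟨hsort, List.pairwise_replicate.mpr (Or.inr le_rfl), ?_⟩
        intro x hx y hy
        have h1 := (hacc x hx).2.1
        have h2 := List.eq_of_mem_replicate hy
        omega
      · rw [List.prod_append, List.prod_replicate, mul_assoc, ← hfac]
        exact hprod
    · have hred : pvFacLoopB (f+1) p m acc = (acc, m) := by
        show (if p * p ≤ m then
          pvFacLoopB f (p+1) (pvStripB p m.natAbs m acc).2 (pvStripB p m.natAbs m acc).1
          else (acc, m)) = _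
        rw [if_neg hcond]
      rw [hred]
      refine ⟨acc, m, rfl, hm, fun x hx => ⟨(hacc x hx).1, (hacc x hx).2.2⟩, hsort, hprod, ?_⟩
      by_cases hm1 : m = 1
      · exact Or.inl hm1
      right
      have h2m : 2 ≤ m := by omega
      have hpm : p ≤ m := by
        by_contra h
        exact hno m h2m (by omega) dvd_rfl
      constructor
      · apply pvPrimeOfNoSmall m h2m
        intro d hd2 hdm hddvd
        rcases lt_or_ge d p with hdp | hdp
        · exact hno d hd2 hdp hddvd
        · obtain ⟨q, hq⟩ := hddvd
          have hq0 : 0 < q := by nlinarith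
          have hq1 : q ≠ 1 := by
            rintro rfl
            omega
          have hq2 : 2 ≤ q := by omega
          have hmlt : m < p * p := by omega
          have h1 : p * q ≤ d * q := by nlinarith
          have h2 : p * q < p * p := by nlinarith
          have hqp : q < p := lt_of_mul_lt_mul_left h2 (by omega)
          exact hno q hq2 hqp ⟨d, by rw [hq]; ring⟩
      · intro x hx
        have := (hacc x hx).2.1
        omega

theorem pvFactorB_eq (n : Int) (hn : 2 ≤ n) : pvFactorB n = pvPF n := by
  obtain ⟨acc', m', heq, hm', hacc, hsort, hprod, hlast⟩ :=
    pvBLoop_inv n (n.natAbs + 2) 2 n [] (le_refl _) (by omega)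
      (by intro d h1 h2; omega) (by intro x hx; simp at hx) List.Pairwise.nil (by simp)
      (by omega)
  unfold pvFactorB
  rw [heq]
  rcases hlast with h1 | ⟨hprime, hbound⟩
  · subst h1
    rw [if_neg (by norm_num)]
    rw [mul_one] at hprod
    exact sorted_primes_eq_pvPF n (by omega) acc' hsort
      (fun x hx => ⟨(hacc x hx).2, by have := (hacc x hx).1; omega⟩) hprod
  · have hm2 : 2 ≤ m' := by
      have := hprime.two_le
      omega
    rw [if_pos (by simpa using (by omega : (1:Int) < m'))]
    apply sorted_primes_eq_pvPF n (by omega)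
    · rw [List.pairwise_append]
      refine ⟨hsort, List.pairwise_singleton _ _, ?_⟩
      intro x hx y hy
      simp at hy
      subst hy
      exact le_of_lt (hbound x hx)
    · intro x hx
      rcases List.mem_append.mp hx with hx | hx
      · exact ⟨(hacc x hx).2, by have := (hacc x hx).1; omega⟩
      · simp at hx
        subst hx
        exact ⟨hprime, by omega⟩
    · rw [List.prod_append, List.prod_singleton]
      exact hprod

-- ---- permutation sums = nonempty sub-multiset sums ----
theorem pvPerms_mem : ∀ (r : Nat) (xs l : List Int),
    l ∈ pvPerms r xs → (l : Multiset Int) ≤ (xs : Multiset Int) ∧ l.length = r := by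
  intro r
  induction r with
  | zero =>
    intro xs l hl
    simp [pvPerms] at hl
    subst hl
    simp
  | succ r ih =>
    intro xs l hl
    simp only [pvPerms, List.mem_flatMap, List.mem_map, List.mem_range] at hl
    obtain ⟨j, hj, p, hp, rfl⟩ := hl
    obtain ⟨hle, hlen⟩ := ih _ p hp
    have hperm : List.Perm (xs.getD j 0 :: xs.eraseIdx j) xs := by
      have h := List.getElem_cons_eraseIdx_perm (l := xs) (n := j) hj
      rwa [List.getD_eq_getElem xs 0 hj]
    constructor
    · calc ((xs.getD j 0 :: p : List Int) : Multiset Int)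
          = xs.getD j 0 ::ₘ (p : Multiset Int) := (Multiset.cons_coe _ _).symm
        _ ≤ xs.getD j 0 ::ₘ (xs.eraseIdx j : Multiset Int) := Multiset.cons_le_cons _ hle
        _ = ((xs.getD j 0 :: xs.eraseIdx j : List Int) : Multiset Int) := Multiset.cons_coe _ _
        _ = (xs : Multiset Int) := Multiset.coe_eq_coe.mpr hperm
    · simp [hlen]

theorem pvPerms_exists (t : Multiset Int) :
    ∀ xs : List Int, t ≤ (xs : Multiset Int) →
    ∃ l ∈ pvPerms t.card xs, (l : Multiset Int) = t := by
  induction t using Multiset.induction_on with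
  | empty =>
    intro xs _
    exact ⟨[], by simp [pvPerms], rfl⟩
  | cons a t ih =>
    intro xs hle
    have ha : a ∈ xs := by
      have h := Multiset.mem_of_le hle (Multiset.mem_cons_self a t)
      simpa using h
    obtain ⟨j, hj, hja⟩ := List.mem_iff_getElem.mp ha
    have hperm : List.Perm (xs[j] :: xs.eraseIdx j) xs := List.getElem_cons_eraseIdx_perm hj
    have hxs : (xs : Multiset Int) = a ::ₘ (xs.eraseIdx j : Multiset Int) := by
      calc (xs : Multiset Int)
          = ((xs[j] :: xs.eraseIdx j : List Int) : Multiset Int) :=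
            (Multiset.coe_eq_coe.mpr hperm).symm
        _ = xs[j] ::ₘ (xs.eraseIdx j : Multiset Int) := (Multiset.cons_coe _ _).symm
        _ = a ::ₘ (xs.eraseIdx j : Multiset Int) := by rw [hja]
    have ht : t ≤ (xs.eraseIdx j : Multiset Int) := by
      rw [hxs] at hle
      exact (Multiset.cons_le_cons_iff a).mp hle
    obtain ⟨l, hl, hlt⟩ := ih _ ht
    refine ⟨a :: l, ?_, by rw [← Multiset.cons_coe, hlt]⟩
    rw [Multiset.card_cons]
    simp only [pvPerms, List.mem_flatMap, List.mem_map, List.mem_range]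
    exact ⟨j, hj, l, hl, by rw [List.getD_eq_getElem xs 0 hj, hja]⟩

theorem pvPermSumsList_mem (xs : List Int) (x : Int) :
    x ∈ pvPermSumsList xs ↔
    ∃ t : Multiset Int, t ≤ (xs : Multiset Int) ∧ t ≠ 0 ∧ t.sum = x := by
  unfold pvPermSumsList
  simp only [List.mem_flatMap, List.mem_map, PySem.List.mem_pyRange_one]
  constructor
  · rintro ⟨i, ⟨hi1, hi2⟩, l, hl, rfl⟩
    obtain ⟨hle, hlen⟩ := pvPerms_mem i.natAbs xs l hl
    refine ⟨(l : Multiset Int), hle, ?_, Multiset.sum_coe l⟩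
    intro h0
    have hc := congrArg Multiset.card h0
    rw [Multiset.coe_card, hlen] at hc
    simp at hc
    omega
  · rintro ⟨t, hle, hne, hsum⟩
    obtain ⟨l, hl, hlt⟩ := pvPerms_exists t xs hle
    have hcard1 : 1 ≤ t.card := by
      rcases Nat.eq_zero_or_pos t.card with h | h
      · exact absurd (Multiset.card_eq_zero.mp h) hne
      · exact h
    have hcardle : t.card ≤ xs.length := by
      have h := Multiset.card_le_card hle
      simpa [Multiset.coe_card] using h
    refine ⟨(t.card : Int), ⟨by exact_mod_cast hcard1, by omega⟩, l, ?_, ?_⟩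
    · rwa [Int.natAbs_natCast]
    · rw [← hsum, ← hlt, Multiset.sum_coe]

-- ---- subset-sum DP = sub-multiset sums ----
theorem pvSubsetSums_foldl : ∀ (xs : List Int) (s : PySem.Set Int) (x : Int),
    x ∈ xs.foldl (fun s q => PySem.Set.union s (PySem.Set.ofList (s.map (fun y => y + q)))) s
    ↔ ∃ t : Multiset Int, t ≤ (xs : Multiset Int) ∧ ∃ y ∈ s, y + t.sum = x := by
  intro xs
  induction xs with
  | nil =>
    intro s x
    simp
  | cons q rest ih =>
    intro s x
    rw [List.foldl_cons, ih]
    constructor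
    · rintro ⟨t, ht, y, hy, hsum⟩
      rcases (PySem.Set.mem_union _ _ _).mp hy with hy | hy
      · refine ⟨t, ?_, y, hy, hsum⟩
        rw [← Multiset.cons_coe]
        exact le_trans ht (Multiset.le_cons_self _ _)
      · rw [PySem.Set.mem_ofList, List.mem_map] at hy
        obtain ⟨z, hz, rfl⟩ := hy
        refine ⟨q ::ₘ t, ?_, z, hz, ?_⟩
        · rw [← Multiset.cons_coe]
          exact Multiset.cons_le_cons q ht
        · rw [Multiset.sum_cons]
          linarith
    · rintro ⟨t, ht, y, hy, hsum⟩
      rw [← Multiset.cons_coe] at ht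
      by_cases hq : q ∈ t
      · have h1 : t.erase q ≤ (rest : Multiset Int) := by
          have h := Multiset.erase_le_erase q ht
          rwa [Multiset.erase_cons_head] at h
        refine ⟨t.erase q, h1, y + q, ?_, ?_⟩
        · exact (PySem.Set.mem_union _ _ _).mpr (Or.inr
            ((PySem.Set.mem_ofList _ _).mpr (List.mem_map.mpr ⟨y, hy, rfl⟩)))
        · have h2 : t.sum = q + (t.erase q).sum := by
            conv_lhs => rw [← Multiset.cons_erase hq]
            rw [Multiset.sum_cons]
          linarith
      · exact ⟨t, (Multiset.le_cons_of_notMem hq).mp ht, y,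
          (PySem.Set.mem_union _ _ _).mpr (Or.inl hy), hsum⟩

theorem pvSubsetSums_mem (xs : List Int) (x : Int) :
    x ∈ pvSubsetSums xs ↔ ∃ t : Multiset Int, t ≤ (xs : Multiset Int) ∧ t.sum = x := by
  unfold pvSubsetSums
  rw [pvSubsetSums_foldl]
  constructor
  · rintro ⟨t, ht, y, hy, hsum⟩
    rw [PySem.Set.mem_ofList] at hy
    simp at hy
    subst hy
    exact ⟨t, ht, by linarith⟩
  · rintro ⟨t, ht, hsum⟩
    refine ⟨t, ht, 0, ?_, by omega⟩
    rw [PySem.Set.mem_ofList]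
    simp

-- the two membership conditions agree on the main branch
theorem pvMainIff (n k : Int) (hn2 : 2 ≤ n) (hk2 : 2 ≤ k) (hklt : k < n) :
    (k ∈ get_prime_factors n ∨ n - k ∈ get_prime_factors n ∨
      k ∈ PySem.Set.ofList (pvPermSumsList (get_prime_factors n))) ↔
    (k ∈ pvSubsetSums (pvFactorB n) ∨ n - k ∈ pvFactorB n) := by
  rw [get_prime_factors_eq n hn2, pvFactorB_eq n hn2]
  by_cases hP : (n.toNat).Prime
  · rw [if_pos hP]
    have hpf : pvPF n = [n] := by
      unfold pvPF
      rw [Nat.primeFactorsList_prime hP]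
      simp [Int.toNat_of_nonneg (by omega : (0:Int) ≤ n)]
    rw [hpf]
    constructor
    · rintro (h | h | h)
      · simp at h
      · simp at h
      · rw [PySem.Set.mem_ofList, pvPermSumsList_mem] at h
        obtain ⟨t, hle, hne, _⟩ := h
        simp at hle
        exact absurd hle hne
    · rintro (h | h)
      · rw [pvSubsetSums_mem] at h
        obtain ⟨t, ht, hsum⟩ := h
        rw [show (([n] : List Int) : Multiset Int) = ({n} : Multiset Int) from
          Multiset.coe_singleton n] at ht
        rcases Multiset.le_singleton.mp ht with rfl | rfl
        · simp at hsum
          omega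
        · rw [Multiset.sum_singleton] at hsum
          omega
      · simp at h
        omega
  · rw [if_neg hP]
    constructor
    · rintro (h | h | h)
      · left
        rw [pvSubsetSums_mem]
        exact ⟨{k}, Multiset.singleton_le.mpr h, Multiset.sum_singleton k⟩
      · right
        exact h
      · left
        rw [pvSubsetSums_mem]
        rw [PySem.Set.mem_ofList, pvPermSumsList_mem] at h
        obtain ⟨t, ht, _, hsum⟩ := h
        exact ⟨t, ht, hsum⟩
    · rintro (h | h)
      · rw [pvSubsetSums_mem] at h
        obtain ⟨t, ht, hsum⟩ := h
        right; right
        rw [PySem.Set.mem_ofList, pvPermSumsList_mem]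
        refine ⟨t, ht, ?_, hsum⟩
        rintro rfl
        rw [Multiset.sum_zero] at hsum
        omega
      · right; left
        exact h

-- ===== VERDICT (by name: the statement is the Claim_ definition above) =====
theorem c_fuge_spec : Claim_equal_c_fuge := by
  unfold Claim_equal_c_fuge
  intro n k _
  unfold Spec_c_fuge c_fuge c_fuge_alt
  split_ifs with hg he hA
  · rfl
  · rfl
  · push Not at hg
    obtain ⟨hn1, hk1, hkn⟩ := hg
    symm
    rw [decide_eq_true_eq]
    exact (pvMainIff n k (by omega) (by omega) (by omega)).mp hA
  · push Not at hg
    obtain ⟨hn1, hk1, hkn⟩ := hg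
    symm
    rw [decide_eq_false_iff_not]
    exact fun hQ => hA ((pvMainIff n k (by omega) (by omega) (by omega)).mpr hQ)
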